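-- pv_equiv track=rewrite | github.com/isleym9447/CTS285 | Streamlit/introspectiveimmersion/reccomendation.py | calculate_trope
-- ===== SOURCE A (Python) =====
-- def calculate_trope(results: dict[str, int]) -> str:
--     """Calculates and returns ONLY the user's primary trope name."""
--     if not results or all(v == 0 for v in results.values()):
--         return "Undetermined"
--
--     primary_trope = max(results, key=results.get)
--     max_score = results[primary_trope]
--
--     # Handle ties by prioritizing the first one alphabetically for simplicity
--     tied_tropes = [k for k, v in results.items() if v == max_score]
--     if len(tied_tropes) > 1:
--         return f"Tied ({' & '.join(tied_tropes)})"
--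
--     return primary_trope
-- ===== SOURCE B (Python) =====
-- def calculate_trope(results: dict[str, int]) -> str:
--     """Calculates and returns ONLY the user's primary trope name."""
--     if not results or all(v == 0 for v in results.values()):
--         return "Undetermined"
--     best = None
--     tied = []
--     for k, v in results.items():
--         if best is None or v > best:
--             best = v
--             tied = [k]
--         elif v == best:
--             tied.append(k)
--     if len(tied) > 1:
--         return f"Tied ({' & '.join(tied)})"
--     return tied[0]
-- ===== Notes on version B (the rewrite author's own statement) =====
-- stated objective: simpler
-- what changed: Replaces the three passes (max over keys with dict lookups, a re-lookup of the max score, and a tie-filter comprehension) by one accumulating loop over the items that maintains the best score and the list of keys tied at it.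
import Mathlib
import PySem

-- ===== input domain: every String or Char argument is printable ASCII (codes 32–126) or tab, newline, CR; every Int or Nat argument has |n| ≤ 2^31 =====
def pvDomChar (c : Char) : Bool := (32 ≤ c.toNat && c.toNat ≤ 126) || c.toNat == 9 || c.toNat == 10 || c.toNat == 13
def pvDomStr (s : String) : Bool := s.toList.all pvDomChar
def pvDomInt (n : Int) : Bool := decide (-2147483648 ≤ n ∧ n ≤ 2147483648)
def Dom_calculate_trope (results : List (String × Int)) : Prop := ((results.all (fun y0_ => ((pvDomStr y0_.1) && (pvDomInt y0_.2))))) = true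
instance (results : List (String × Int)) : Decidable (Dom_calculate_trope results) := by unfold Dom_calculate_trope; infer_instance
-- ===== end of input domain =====

-- B replaces A's three passes (max-by-lookup, score re-lookup, tie-filter) by one accumulating
-- loop over the items keeping the best score and the keys tied at it; objective: simpler.


-- ===== PORT A =====
def calculate_trope (results : List (String × Int)) : String :=
  let d : PySem.Dict String Int := PySem.Dict.mk results
  if results.isEmpty || (results.map Prod.snd).all (fun v => v == 0) then "Undetermined"
  else
    -- max(results, key=results.get); the key is always present, so .get's None never arises (getD's default is dead)
    match PySem.List.max? (results.map Prod.fst) (fun k => d.getD k 0) with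
    | none => "Undetermined"  -- unreachable: the guard ensures results ≠ []
    | some primary_trope =>
      let max_score := d.getD primary_trope 0
      let tied_tropes := (results.filter (fun p => p.2 == max_score)).map Prod.fst
      if tied_tropes.length > 1 then "Tied (" ++ PySem.Str.join " & " tied_tropes ++ ")"
      else primary_trope

-- ===== PORT B =====
-- loop body of B's single pass: update (best, tied) with the item p
def calcStep (acc : Option Int × List String) (p : String × Int) : Option Int × List String :=
  match acc.1 with
  | none => (some p.2, [p.1])
  | some best =>
    if best < p.2 then (some p.2, [p.1])
    else if p.2 == best then (acc.1, acc.2 ++ [p.1])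
    else acc

def calculate_trope_alt (results : List (String × Int)) : String :=
  if results.isEmpty || results.all (fun p => p.2 == 0) then "Undetermined"
  else
    let st := results.foldl calcStep (none, [])
    if st.2.length > 1 then "Tied (" ++ PySem.Str.join " & " st.2 ++ ")"
    else st.2.headD ""  -- tied[0]; tied is nonempty here since results ≠ []

-- ===== PRECONDITION & SPEC =====
-- Pre_ requires distinct keys: the argument encodes a Python dict, which cannot hold duplicate keys,
-- so association lists with a repeated key represent no input of the original program.
def Pre_calculate_trope (results : List (String × Int)) : Prop := (results.map Prod.fst).Nodup
instance (results : List (String × Int)) : Decidable (Pre_calculate_trope results) := by unfold Pre_calculate_trope; infer_instance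
def pvWitness_calculate_trope : (List (String × Int)) := [("a", 3), ("b", 1), ("c", 3)]

def Spec_calculate_trope (results : List (String × Int)) (out : String) : Prop := out = calculate_trope_alt results
instance (results : List (String × Int)) (out : String) : Decidable (Spec_calculate_trope results out) := by unfold Spec_calculate_trope; infer_instance

-- ===== CLAIM (what is proved, stated in full; the proofs are below) =====
def Claim_equal_calculate_trope : Prop := ∀ (results : List (String × Int)), Dom_calculate_trope results → Pre_calculate_trope results → Spec_calculate_trope results (calculate_trope results)

-- ===== LEMMAS AND PROOFS =====

-- running max is ≥ its seed
theorem pv_le_foldl_max (l : List (String × Int)) (b : Int) :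
    b ≤ l.foldl (fun a q => max a q.2) b := by
  induction l generalizing b with
  | nil => simp
  | cons p rest ih => exact le_trans (le_max_left _ _) (ih (max b p.2))

-- the running max bounds every element and is attained
theorem pv_foldl_max_spec (l : List (String × Int)) (b : Int) :
    (l.foldl (fun a q => max a q.2) b = b ∨
      ∃ q ∈ l, q.2 = l.foldl (fun a q => max a q.2) b) ∧
    ∀ r ∈ l, r.2 ≤ l.foldl (fun a q => max a q.2) b := by
  induction l generalizing b with
  | nil => simp
  | cons p rest ih =>
    obtain ⟨h1, h2⟩ := ih (max b p.2)
    constructor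
    · rcases h1 with h | ⟨q, hq, hq2⟩
      · rcases le_total b p.2 with hle | hle
        · right
          refine ⟨p, by simp, ?_⟩
          rw [max_eq_right hle] at h
          rw [List.foldl_cons, max_eq_right hle]
          exact h.symm
        · left
          rw [max_eq_left hle] at h
          rw [List.foldl_cons, max_eq_left hle]
          exact h
      · right; exact ⟨q, by simp [hq], hq2⟩
    · intro r hr
      rcases List.mem_cons.mp hr with h | h
      · subst h; exact le_trans (le_max_right b r.2) (pv_le_foldl_max rest _)
      · exact h2 r h

-- first-match lookup on nodup keys returns the pair's value
theorem pv_getD_of_mem (results : List (String × Int)) (k : String) (v : Int)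
    (hnd : (results.map Prod.fst).Nodup) (hmem : (k, v) ∈ results) :
    (PySem.Dict.mk results).getD k 0 = v := by
  induction results with
  | nil => cases hmem
  | cons p rest ih =>
    simp only [List.map_cons, List.nodup_cons] at hnd
    rcases List.mem_cons.mp hmem with h | h
    · subst h
      simp [PySem.Dict.getD, PySem.Dict.get?, List.find?]
    · have hk : k ∈ rest.map Prod.fst := List.mem_map_of_mem h
      have hne : (p.1 == k) = false := by
        simp only [beq_eq_false_iff_ne]; intro he; exact hnd.1 (he ▸ hk)
      have := ih hnd.2 h
      simpa [PySem.Dict.getD, PySem.Dict.get?, List.find?, hne] using this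

-- characterisation of B's accumulating loop
theorem pv_fold_char (l : List (String × Int)) (b : Int) (t : List String) :
    l.foldl calcStep (some b, t)
    = (some (l.foldl (fun a q => max a q.2) b),
        (if b = l.foldl (fun a q => max a q.2) b then t else []) ++
          (l.filter (fun p => p.2 == l.foldl (fun a q => max a q.2) b)).map Prod.fst) := by
  induction l generalizing b t with
  | nil => simp
  | cons p rest ih =>
    simp only [List.foldl_cons, List.filter_cons]
    by_cases h1 : b < p.2
    · have hbM : b < rest.foldl (fun a q => max a q.2) p.2 :=
        lt_of_lt_of_le h1 (pv_le_foldl_max rest _)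
      rw [show calcStep (some b, t) p = (some p.2, [p.1]) from by simp [calcStep, h1]]
      simp only [show max b p.2 = p.2 from max_eq_right (le_of_lt h1)]
      rw [ih p.2 [p.1], if_neg (ne_of_lt hbM)]
      by_cases h2 : p.2 = rest.foldl (fun a q => max a q.2) p.2
      · simp [← h2]
      · simp [h2]
    · simp only [show max b p.2 = b from max_eq_left (not_lt.mp h1)]
      by_cases h2 : p.2 = b
      · rw [show calcStep (some b, t) p = (some b, t ++ [p.1]) from by
            simp [calcStep, h2], ih b (t ++ [p.1])]
        by_cases h3 : b = rest.foldl (fun a q => max a q.2) b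
        · simp [← h3, h2]
        · have : (p.2 == rest.foldl (fun a q => max a q.2) b) = false := by
            simp only [beq_eq_false_iff_ne]; rw [h2]; exact h3
          simp [h3, this]
      · have hlt : p.2 < b := lt_of_le_of_ne (not_lt.mp h1) h2
        rw [show calcStep (some b, t) p = (some b, t) from by
            simp [calcStep, h1, h2], ih b t]
        have hpM : (p.2 == rest.foldl (fun a q => max a q.2) b) = false := by
          simp only [beq_eq_false_iff_ne]
          exact ne_of_lt (lt_of_lt_of_le hlt (pv_le_foldl_max rest b))
        simp [hpM]

-- ===== VERDICT (by name: the statement is the Claim_ definition above) =====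
theorem calculate_trope_spec : Claim_equal_calculate_trope := by
  intro results _ hnd
  unfold Spec_calculate_trope
  cases results with
  | nil => rfl
  | cons p rest =>
    have hbound : ∀ r ∈ p :: rest, r.2 ≤ rest.foldl (fun a q => max a q.2) p.2 := by
      intro r hr
      rcases List.mem_cons.mp hr with h | h
      · subst h; exact pv_le_foldl_max rest r.2
      · exact (pv_foldl_max_spec rest p.2).2 r h
    have hattain : ∃ q ∈ p :: rest, q.2 = rest.foldl (fun a q => max a q.2) p.2 := by
      rcases (pv_foldl_max_spec rest p.2).1 with h | ⟨q, hq, hq2⟩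
      · exact ⟨p, by simp, h.symm⟩
      · exact ⟨q, by simp [hq], hq2⟩
    obtain ⟨q, hqmem, hqM⟩ := hattain
    rcases hmx : PySem.List.max? ((p :: rest).map Prod.fst)
        (fun k => (PySem.Dict.mk (p :: rest)).getD k 0) with _ | primary
    · exact absurd ((PySem.List.max?_eq_none_iff _ _).mp hmx) (by simp)
    · have hmem := PySem.List.max?_mem hmx
      obtain ⟨pr, hpr, hprfst⟩ := List.mem_map.mp hmem
      have hprD : (PySem.Dict.mk (p :: rest)).getD primary 0 = pr.2 := by
        rw [← hprfst]; exact pv_getD_of_mem _ _ _ hnd (by simpa using hpr)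
      have hqD : (PySem.Dict.mk (p :: rest)).getD q.1 0 = q.2 :=
        pv_getD_of_mem _ _ _ hnd (by simpa using hqmem)
      have hscore : (PySem.Dict.mk (p :: rest)).getD primary 0
          = rest.foldl (fun a r => max a r.2) p.2 := by
        have h1 := PySem.List.max?_isMax hmx q.1 (List.mem_map_of_mem hqmem)
        rw [hqD, hqM] at h1
        rw [hprD] at h1 ⊢
        exact le_antisymm (hbound pr hpr) h1
      have hstep : calcStep (none, []) p = (some p.2, [p.1]) := by simp [calcStep]
      by_cases hz : ((p :: rest).all fun r => r.2 == 0) = true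
      · have hz' : (((p :: rest).map Prod.snd).all fun v => v == 0) = true := by
          simpa [List.all_map, Function.comp] using hz
        have hcA : ((p :: rest).isEmpty || ((p :: rest).map Prod.snd).all fun v => v == 0) = true := by
          rw [List.isEmpty_cons, Bool.false_or]; exact hz'
        have hcB : ((p :: rest).isEmpty || (p :: rest).all fun r => r.2 == 0) = true := by
          rw [List.isEmpty_cons, Bool.false_or]; exact hz
        simp only [calculate_trope, calculate_trope_alt]
        rw [if_pos hcA, if_pos hcB]
      · have hz2 : ((p :: rest).all fun r => r.2 == 0) = false :=
          Bool.eq_false_iff.mpr hz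
        have hz' : (((p :: rest).map Prod.snd).all fun v => v == 0) = false := by
          simpa [List.all_map, Function.comp] using hz2
        simp only [calculate_trope, calculate_trope_alt, List.isEmpty_cons, Bool.false_or,
          hz', hz2, Bool.false_eq_true, if_false, hmx, List.foldl_cons, hstep, pv_fold_char,
          hscore]
        have hT : ((p :: rest).filter
              (fun r => r.2 == rest.foldl (fun a r => max a r.2) p.2)).map Prod.fst
            = (if p.2 = rest.foldl (fun a r => max a r.2) p.2 then [p.1] else []) ++
              (rest.filter (fun r => r.2 == rest.foldl (fun a r => max a r.2) p.2)).map
                Prod.fst := by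
          by_cases hp : p.2 = rest.foldl (fun a r => max a r.2) p.2
          · have hb : (p.2 == rest.foldl (fun a r => max a r.2) p.2) = true :=
              beq_iff_eq.mpr hp
            simp only [List.filter_cons, hb, if_true, if_pos hp, List.map_cons]
            simp
          · have hb : (p.2 == rest.foldl (fun a r => max a r.2) p.2) = false :=
              beq_eq_false_iff_ne.mpr hp
            simp only [List.filter_cons, hb, Bool.false_eq_true, if_false, if_neg hp]
            simp
        rw [← hT]
        set T := ((p :: rest).filter
            (fun r => r.2 == rest.foldl (fun a r => max a r.2) p.2)).map Prod.fst with hTdef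
        have hqT : q.1 ∈ T := by
          apply List.mem_map_of_mem
          rw [List.mem_filter]
          exact ⟨hqmem, by simp [hqM]⟩
        have hpT : primary ∈ T := by
          rw [← hprfst]
          apply List.mem_map_of_mem
          rw [List.mem_filter]
          refine ⟨hpr, ?_⟩
          have hpr2 : pr.2 = rest.foldl (fun a r => max a r.2) p.2 := by
            rw [← hprD, hscore]
          exact beq_iff_eq.mpr hpr2
        by_cases hlen : 1 < T.length
        · simp [hlen]
        · have hsing : T = [primary] := by
            cases hTval : T with
            | nil => rw [hTval] at hqT; cases hqT
            | cons x xs =>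
              cases xs with
              | nil =>
                rw [hTval] at hpT
                simp only [List.mem_singleton] at hpT
                rw [hpT]
              | cons y ys =>
                rw [hTval] at hlen
                simp at hlen
          simp [hsing]
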